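-- pv_equiv track=rewrite | github.com/craigbanyard/advent_of_code | 2019/Day22/Day22.py | exp_lcf
-- ===== SOURCE A (Python) =====
-- def compose_lcf(f, g, m):
--     """
--     Compose functions f and g: (f ∘ g)(x) = f(g(x)), where:
--         f(x) = ax + b mod m
--         g(x) = cx + d mod m
--     Return parameters for (f ∘ g)(x)
--     """
--     a, b = f
--     c, d = g
--     return (a * c) % m, ((b * c) + d) % m
--
-- def exp_lcf(f, m, n):
--     """
--     Compute result of composing f with itself n times (mod m).
--     i.e. functional power / iterated function. See:
--     https://en.wikipedia.org/wiki/Function_composition#Functional_powers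
--     Compute efficiently using exponentiation by squaring.
--     This is possible because LCF composition is associative.
--     """
--     r = (1, 0)    # Identity LCF
--     while n > 0:
--         if n % 2 == 1:
--             r = compose_lcf(r, f, m)
--             n -= 1
--         f = compose_lcf(f, f, m)
--         n //= 2
--     return r
-- ===== SOURCE B (Python) =====
-- def compose_lcf(f, g, m):
--     a, b = f
--     c, d = g
--     return (a * c) % m, ((b * c) + d) % m
--
-- def exp_lcf(f, m, n):
--     """Recursive divide-and-conquer functional power of the LCF f (mod m)."""
--     if n <= 0:
--         return (1, 0)
--     if n % 2 == 0:
--         h = exp_lcf(f, m, n // 2)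
--         return compose_lcf(h, h, m)
--     return compose_lcf(exp_lcf(f, m, n - 1), f, m)
-- ===== Notes on version B (the rewrite author's own statement) =====
-- stated objective: alternative
-- what changed: Replaced the iterative binary exponentiation-by-squaring while-loop (accumulator r, repeatedly squared f, bit-scanning n) with a recursive divide-and-conquer on n (even: square the recursive half-power; odd: compose the (n-1)-power with f), keeping compose_lcf unchanged.
import Mathlib
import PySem

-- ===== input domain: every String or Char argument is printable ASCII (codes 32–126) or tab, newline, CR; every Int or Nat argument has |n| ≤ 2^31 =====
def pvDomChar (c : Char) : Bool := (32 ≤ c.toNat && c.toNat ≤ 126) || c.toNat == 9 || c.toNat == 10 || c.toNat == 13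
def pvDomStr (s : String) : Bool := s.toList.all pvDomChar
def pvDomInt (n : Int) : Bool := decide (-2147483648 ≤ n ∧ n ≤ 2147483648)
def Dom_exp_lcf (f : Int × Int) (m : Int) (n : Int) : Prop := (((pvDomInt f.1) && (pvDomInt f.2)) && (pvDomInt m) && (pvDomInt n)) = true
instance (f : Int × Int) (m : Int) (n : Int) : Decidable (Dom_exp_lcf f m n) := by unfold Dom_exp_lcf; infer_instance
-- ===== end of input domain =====

-- B replaces A's iterative squaring loop by recursive divide-and-conquer on n (alternative decomposition, same cost).

-- ===== PORT A =====
-- compose_lcf(f, g, m) from the Python module (shared by both ports)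
def compose_lcf (f g : Int × Int) (m : Int) : Int × Int :=
  (PySem.Int.mod (f.1 * g.1) m, PySem.Int.mod (f.2 * g.1 + g.2) m)

-- the 'while n > 0' loop of A, state (r, f, n)
def expLcfLoop (r f : Int × Int) (m : Int) (n : Int) : Int × Int :=
  if _h : 0 < n then
    if PySem.Int.mod n 2 = 1 then
      expLcfLoop (compose_lcf r f m) (compose_lcf f f m) m (PySem.Int.floordiv (n - 1) 2)
    else
      expLcfLoop r (compose_lcf f f m) m (PySem.Int.floordiv n 2)
  else r
termination_by n.toNat
decreasing_by
  · rw [PySem.Int.floordiv_eq_ediv_of_pos (by norm_num)]; omega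
  · rw [PySem.Int.floordiv_eq_ediv_of_pos (by norm_num)]; omega

def exp_lcf (f : Int × Int) (m : Int) (n : Int) : Int × Int :=
  expLcfLoop (1, 0) f m n

-- ===== PORT B =====
def exp_lcf_alt (f : Int × Int) (m : Int) (n : Int) : Int × Int :=
  if _h : n ≤ 0 then (1, 0)
  else if PySem.Int.mod n 2 = 0 then
    let h := exp_lcf_alt f m (PySem.Int.floordiv n 2)
    compose_lcf h h m
  else
    compose_lcf (exp_lcf_alt f m (n - 1)) f m
termination_by n.toNat
decreasing_by
  · rw [PySem.Int.floordiv_eq_ediv_of_pos (by norm_num)]; omega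
  · omega

-- ===== PRECONDITION & SPEC =====
-- Pre_ excludes only m = 0 with n > 0, where Python A raises ZeroDivisionError in '%'.
def Pre_exp_lcf (f : Int × Int) (m : Int) (n : Int) : Prop := m ≠ 0 ∨ n ≤ 0
instance (f : Int × Int) (m : Int) (n : Int) : Decidable (Pre_exp_lcf f m n) := by unfold Pre_exp_lcf; infer_instance
def pvWitness_exp_lcf : (Int × Int) × Int × Int := ((2, 3), 10, 5)

def Spec_exp_lcf (f : Int × Int) (m : Int) (n : Int) (out : Int × Int) : Prop := out = exp_lcf_alt f m n
instance (f : Int × Int) (m : Int) (n : Int) (out : Int × Int) : Decidable (Spec_exp_lcf f m n out) := by unfold Spec_exp_lcf; infer_instance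

-- ===== CLAIM (what is proved, stated in full; the proofs are below) =====
def Claim_equal_exp_lcf : Prop := ∀ (f : Int × Int) (m : Int) (n : Int), Dom_exp_lcf f m n → Pre_exp_lcf f m n → Spec_exp_lcf f m n (exp_lcf f m n)

-- ===== LEMMAS AND PROOFS =====

-- Python's floored mod written via floordiv
theorem pv_mod_sub (a m : Int) : PySem.Int.mod a m = a - PySem.Int.floordiv a m * m := by
  have h := PySem.Int.floordiv_mul_add_mod a m; linarith

theorem pv_mod_modeq (a m : Int) : Int.ModEq m (PySem.Int.mod a m) a := by
  rw [Int.modEq_iff_dvd, pv_mod_sub]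
  exact ⟨PySem.Int.floordiv a m, by ring⟩

-- floored mod respects congruence mod m (m ≠ 0)
theorem pv_mod_congr {m : Int} (hm : m ≠ 0) {x y : Int} (h : Int.ModEq m x y) :
    PySem.Int.mod x m = PySem.Int.mod y m := by
  have h1 : Int.ModEq m (PySem.Int.mod x m) (PySem.Int.mod y m) :=
    ((pv_mod_modeq x m).trans h).trans (pv_mod_modeq y m).symm
  have hdvd : m ∣ PySem.Int.mod y m - PySem.Int.mod x m := h1.dvd
  have hzero : PySem.Int.mod y m - PySem.Int.mod x m = 0 := by
    rcases lt_or_gt_of_ne hm with hneg | hpos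
    · apply Int.eq_zero_of_abs_lt_dvd (neg_dvd.mpr hdvd)
      have b1 := PySem.Int.mod_neg_bounds x hneg
      have b2 := PySem.Int.mod_neg_bounds y hneg
      rw [abs_lt]; omega
    · apply Int.eq_zero_of_abs_lt_dvd hdvd
      have b1 := PySem.Int.mod_nonneg x hpos
      have b2 := PySem.Int.mod_nonneg y hpos
      have c1 := PySem.Int.mod_lt x hpos
      have c2 := PySem.Int.mod_lt y hpos
      rw [abs_lt]; omega
  linarith

theorem op_congr {m : Int} (hm : m ≠ 0) {x x' y y' : Int × Int}
    (h1 : Int.ModEq m x.1 x'.1) (h2 : Int.ModEq m x.2 x'.2)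
    (h3 : Int.ModEq m y.1 y'.1) (h4 : Int.ModEq m y.2 y'.2) :
    compose_lcf x y m = compose_lcf x' y' m := by
  unfold compose_lcf
  refine Prod.ext ?_ ?_ <;> dsimp only
  · exact pv_mod_congr hm (h1.mul h3)
  · exact pv_mod_congr hm ((h2.mul h3).add h4)

theorem op_assoc {m : Int} (hm : m ≠ 0) (x y z : Int × Int) :
    compose_lcf (compose_lcf x y m) z m = compose_lcf x (compose_lcf y z m) m := by
  have L : compose_lcf (compose_lcf x y m) z m
      = compose_lcf (x.1 * y.1, x.2 * y.1 + y.2) z m :=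
    op_congr hm (pv_mod_modeq _ m) (pv_mod_modeq _ m) Int.ModEq.rfl Int.ModEq.rfl
  have R : compose_lcf x (compose_lcf y z m) m
      = compose_lcf x (y.1 * z.1, y.2 * z.1 + z.2) m :=
    op_congr hm Int.ModEq.rfl Int.ModEq.rfl (pv_mod_modeq _ m) (pv_mod_modeq _ m)
  rw [L, R]
  unfold compose_lcf
  refine Prod.ext ?_ ?_ <;> dsimp only
  · exact congrArg (PySem.Int.mod · m) (by ring)
  · exact congrArg (PySem.Int.mod · m) (by ring)

-- reference power: n-fold composition, reduced mod m
def pw (f : Int × Int) (m : Int) : Nat → Int × Int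
  | 0 => (1, 0)
  | k + 1 => compose_lcf (pw f m k) f m

-- composing with the identity on the left only reduces; a pw (k ≥ 1) is already reduced
theorem pw_reduce {m : Int} (hm : m ≠ 0) (f : Int × Int) (k : Nat) :
    compose_lcf (1, 0) (pw f m (k + 1)) m = pw f m (k + 1) := by
  show compose_lcf (1, 0) (compose_lcf (pw f m k) f m) m = _
  unfold compose_lcf
  refine Prod.ext ?_ ?_ <;> dsimp only
  · exact (pv_mod_congr hm ((pv_mod_modeq _ m).mul_left 1)).trans
      (pv_mod_congr hm (by simpa using Int.ModEq.rfl))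
  · refine (pv_mod_congr hm ?_)
    calc (0 : Int) * PySem.Int.mod ((pw f m k).1 * f.1) m + PySem.Int.mod ((pw f m k).2 * f.1 + f.2) m
        = PySem.Int.mod ((pw f m k).2 * f.1 + f.2) m := by ring_nf
      _ ≡ (pw f m k).2 * f.1 + f.2 [ZMOD m] := pv_mod_modeq _ m

theorem pw_add {m : Int} (hm : m ≠ 0) (f : Int × Int) (j k : Nat) :
    compose_lcf (pw f m (j + 1)) (pw f m k) m = pw f m (j + 1 + k) := by
  induction k with
  | zero =>
    show compose_lcf (compose_lcf (pw f m j) f m) (1, 0) m = _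
    unfold compose_lcf
    refine Prod.ext ?_ ?_ <;> dsimp only
    · exact (pv_mod_congr hm (by simpa using (pv_mod_modeq ((pw f m j).1 * f.1) m)))
    · refine pv_mod_congr hm ?_
      calc PySem.Int.mod ((pw f m j).2 * f.1 + f.2) m * 1 + 0
          = PySem.Int.mod ((pw f m j).2 * f.1 + f.2) m := by ring
        _ ≡ (pw f m j).2 * f.1 + f.2 [ZMOD m] := pv_mod_modeq _ m
  | succ k ih =>
    show compose_lcf (pw f m (j + 1)) (compose_lcf (pw f m k) f m) m = compose_lcf (pw f m (j + 1 + k)) f m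
    rw [← op_assoc hm, ih]

theorem pw_one_modeq1 (f : Int × Int) (m : Int) : Int.ModEq m f.1 (pw f m 1).1 := by
  show Int.ModEq m f.1 (PySem.Int.mod (1 * f.1) m)
  calc f.1 = 1 * f.1 := (one_mul _).symm
    _ ≡ PySem.Int.mod (1 * f.1) m [ZMOD m] := (pv_mod_modeq _ m).symm

theorem pw_one_modeq2 (f : Int × Int) (m : Int) : Int.ModEq m f.2 (pw f m 1).2 := by
  show Int.ModEq m f.2 (PySem.Int.mod (0 * f.1 + f.2) m)
  calc f.2 = 0 * f.1 + f.2 := by ring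
    _ ≡ PySem.Int.mod (0 * f.1 + f.2) m [ZMOD m] := (pv_mod_modeq _ m).symm

theorem f_eq_pw_one {m : Int} (hm : m ≠ 0) (f x : Int × Int) :
    compose_lcf x f m = compose_lcf x (pw f m 1) m :=
  op_congr hm Int.ModEq.rfl Int.ModEq.rfl (pw_one_modeq1 f m) (pw_one_modeq2 f m)

theorem f_eq_pw_one_left {m : Int} (hm : m ≠ 0) (f x : Int × Int) :
    compose_lcf f x m = compose_lcf (pw f m 1) x m :=
  op_congr hm (pw_one_modeq1 f m) (pw_one_modeq2 f m) Int.ModEq.rfl Int.ModEq.rfl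

theorem pw_sq {m : Int} (hm : m ≠ 0) (f : Int × Int) (k : Nat) :
    pw (compose_lcf f f m) m (k + 1) = pw f m (2 * (k + 1)) := by
  induction k with
  | zero =>
    show compose_lcf (1, 0) (compose_lcf f f m) m = pw f m 2
    have h2 : pw f m 2 = compose_lcf (pw f m 1) f m := rfl
    have h1 : pw f m 1 = compose_lcf (1, 0) f m := rfl
    rw [h2, h1]
    unfold compose_lcf
    refine Prod.ext ?_ ?_ <;> dsimp only
    · refine pv_mod_congr hm ?_
      calc (1 : Int) * PySem.Int.mod (f.1 * f.1) m
          = PySem.Int.mod (f.1 * f.1) m := by ring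
        _ ≡ f.1 * f.1 [ZMOD m] := pv_mod_modeq _ m
        _ ≡ PySem.Int.mod (1 * f.1) m * f.1 [ZMOD m] := by
            exact (((pv_mod_modeq (1 * f.1) m).trans (by simpa using Int.ModEq.rfl)).mul_right f.1).symm
    · refine pv_mod_congr hm ?_
      calc (0 : Int) * PySem.Int.mod (f.1 * f.1) m + PySem.Int.mod (f.2 * f.1 + f.2) m
          = PySem.Int.mod (f.2 * f.1 + f.2) m := by ring_nf
        _ ≡ f.2 * f.1 + f.2 [ZMOD m] := pv_mod_modeq _ m
        _ ≡ PySem.Int.mod (0 * f.1 + f.2) m * f.1 + f.2 [ZMOD m] := by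
            refine Int.ModEq.add_right f.2 ?_
            exact (((pv_mod_modeq (0 * f.1 + f.2) m).trans (by simpa using Int.ModEq.rfl)).mul_right f.1).symm
  | succ k ih =>
    show compose_lcf (pw (compose_lcf f f m) m (k + 1)) (compose_lcf f f m) m = pw f m (2 * (k + 2))
    rw [ih]
    have : compose_lcf (pw f m (2 * (k + 1))) (compose_lcf f f m) m
        = compose_lcf (compose_lcf (pw f m (2 * (k + 1))) f m) f m := (op_assoc hm _ _ _).symm
    rw [this]
    have e1 : compose_lcf (pw f m (2 * (k + 1))) f m = pw f m (2 * (k + 1) + 1) := rfl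
    have e2 : compose_lcf (pw f m (2 * (k + 1) + 1)) f m = pw f m (2 * (k + 1) + 2) := rfl
    rw [e1, e2]; ring_nf

-- B computes pw
theorem alt_eq_pw {m : Int} (hm : m ≠ 0) (f : Int × Int) :
    ∀ N : Nat, ∀ n : Int, n.toNat = N → 0 ≤ n → exp_lcf_alt f m n = pw f m n.toNat := by
  intro N
  induction N using Nat.strong_induction_on with
  | _ N ih =>
    intro n hN hn
    rw [exp_lcf_alt]
    by_cases hz : n ≤ 0
    · have : n = 0 := le_antisymm hz hn
      simp [this, pw]
    · rw [not_le] at hz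
      rw [dif_neg (by omega)]
      have hmod : PySem.Int.mod n 2 = n % 2 := PySem.Int.mod_eq_emod_of_pos (by norm_num)
      have hdiv : PySem.Int.floordiv n 2 = n / 2 := PySem.Int.floordiv_eq_ediv_of_pos (by norm_num)
      by_cases he : PySem.Int.mod n 2 = 0
      · rw [if_pos he]
        have he' : n % 2 = 0 := by omega
        have h1 : exp_lcf_alt f m (PySem.Int.floordiv n 2) = pw f m (n / 2).toNat := by
          rw [hdiv]; exact ih (n / 2).toNat (by omega) _ rfl (by omega)
        show compose_lcf (exp_lcf_alt f m (PySem.Int.floordiv n 2)) (exp_lcf_alt f m (PySem.Int.floordiv n 2)) m = _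
        rw [h1]
        have hk : ∃ k : Nat, (n / 2).toNat = k + 1 := ⟨(n / 2).toNat - 1, by omega⟩
        obtain ⟨k, hk⟩ := hk
        rw [hk, pw_add hm f k (k + 1)]
        congr 1; omega
      · rw [if_neg he]
        have h1 : exp_lcf_alt f m (n - 1) = pw f m (n - 1).toNat := ih (n - 1).toNat (by omega) _ rfl (by omega)
        rw [h1]
        have : n.toNat = (n - 1).toNat + 1 := by omega
        rw [this]; rfl

-- A's loop computes r ∘ pw
theorem loop_eq_pw {m : Int} (hm : m ≠ 0) :
    ∀ N : Nat, ∀ n : Int, n.toNat = N → 0 < n → ∀ r f : Int × Int,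
      expLcfLoop r f m n = compose_lcf r (pw f m n.toNat) m := by
  intro N
  induction N using Nat.strong_induction_on with
  | _ N ih =>
    intro n hN hn r f
    rw [expLcfLoop, dif_pos hn]
    have hmod : PySem.Int.mod n 2 = n % 2 := PySem.Int.mod_eq_emod_of_pos (by norm_num)
    have hdiv1 : PySem.Int.floordiv (n - 1) 2 = (n - 1) / 2 := PySem.Int.floordiv_eq_ediv_of_pos (by norm_num)
    have hdiv : PySem.Int.floordiv n 2 = n / 2 := PySem.Int.floordiv_eq_ediv_of_pos (by norm_num)
    by_cases ho : PySem.Int.mod n 2 = 1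
    · rw [if_pos ho]
      have ho' : n % 2 = 1 := by omega
      by_cases h1 : n = 1
      · subst h1
        rw [hdiv1]; norm_num
        rw [expLcfLoop, dif_neg (by norm_num)]
        rw [f_eq_pw_one hm f r]
      · have hge : 0 < (n - 1) / 2 := by omega
        have := ih ((n - 1) / 2).toNat (by omega) ((n - 1) / 2) rfl hge
          (compose_lcf r f m) (compose_lcf f f m)
        rw [hdiv1, this]
        have hk : ∃ k : Nat, ((n - 1) / 2).toNat = k + 1 := ⟨((n - 1) / 2).toNat - 1, by omega⟩
        obtain ⟨k, hk⟩ := hk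
        rw [hk, pw_sq hm, op_assoc hm, f_eq_pw_one_left hm f,
          show compose_lcf (pw f m 1) (pw f m (2 * (k + 1))) m = pw f m (1 + 2 * (k + 1)) from pw_add hm f 0 (2 * (k + 1))]
        congr 2; omega
    · rw [if_neg ho]
      have ho' : n % 2 = 0 := by omega
      have hge : 0 < n / 2 := by omega
      have := ih (n / 2).toNat (by omega) (n / 2) rfl hge r (compose_lcf f f m)
      rw [hdiv, this]
      have hk : ∃ k : Nat, (n / 2).toNat = k + 1 := ⟨(n / 2).toNat - 1, by omega⟩
      obtain ⟨k, hk⟩ := hk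
      rw [hk, pw_sq hm]
      congr 2; omega

-- ===== VERDICT (by name: the statement is the Claim_ definition above) =====
theorem exp_lcf_spec : Claim_equal_exp_lcf := by
  unfold Claim_equal_exp_lcf
  intro f m n _ hpre
  unfold Spec_exp_lcf exp_lcf
  by_cases hn : 0 < n
  · have hm : m ≠ 0 := by
      cases hpre with
      | inl h => exact h
      | inr h => omega
    rw [loop_eq_pw hm n.toNat n rfl hn, alt_eq_pw hm f n.toNat n rfl (by omega)]
    have hk : ∃ k : Nat, n.toNat = k + 1 := ⟨n.toNat - 1, by omega⟩
    obtain ⟨k, hk⟩ := hk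
    rw [hk]; exact pw_reduce hm f k
  · rw [expLcfLoop, dif_neg hn, exp_lcf_alt, dif_pos (by omega)]
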